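-- pv_equiv track=rewrite | github.com/pranshu28/euler_project | Goldbach's other conjecture.py | oddcomp
-- ===== SOURCE A (Python) =====
-- def oddcomp(n):
--     k=0
--     for i in range(2,n):
--         if n%i==0 and n%2==1:
--             k=1
--     if k==0:
--         return False
--     else:
--         return True
-- ===== SOURCE B (Python) =====
-- def oddcomp(n):
--     # odd composite test: trial division by odd candidates up to sqrt(n)
--     if n % 2 == 0 or n < 9:
--         return False
--     i = 3
--     while i * i <= n:
--         if n % i == 0:
--             return True
--         i += 2
--     return False
-- ===== Notes on version B (the rewrite author's own statement) =====
-- stated objective: faster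
-- what changed: B guards first (even or smaller than the least odd composite returns False), then trial-divides only by odd candidates up to sqrt(n) with early exit, instead of A's flag-setting scan of every i in range(2,n).
import Mathlib
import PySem

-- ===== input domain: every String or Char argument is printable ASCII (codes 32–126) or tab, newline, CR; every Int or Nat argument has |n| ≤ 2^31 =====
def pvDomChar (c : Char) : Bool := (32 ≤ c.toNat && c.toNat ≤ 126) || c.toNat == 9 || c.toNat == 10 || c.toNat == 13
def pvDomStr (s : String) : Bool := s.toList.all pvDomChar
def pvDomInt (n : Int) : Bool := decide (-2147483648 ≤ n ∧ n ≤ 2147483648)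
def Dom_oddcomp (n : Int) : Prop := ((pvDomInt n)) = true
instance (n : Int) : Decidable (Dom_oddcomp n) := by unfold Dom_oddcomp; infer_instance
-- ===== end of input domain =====

-- B: guard out even and too-small inputs, then trial division by odd i with i*i ≤ n (early exit) instead of A's full 2..n-1 scan (faster, measured).


-- ===== PORT A =====
def oddcomp (n : Int) : Bool :=
  let k : Int :=
    (PySem.List.pyRange 2 n 1).foldl
      (fun k i => if PySem.Int.mod n i == 0 && PySem.Int.mod n 2 == 1 then 1 else k) 0
  if k == 0 then false else true

-- ===== PORT B =====
def oddcompLoop (n : Int) (i : Int) (hi : 3 ≤ i) : Bool :=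
  if h : i * i ≤ n then
    if PySem.Int.mod n i == 0 then true
    else oddcompLoop n (i + 2) (by omega)
  else false
  termination_by (n - i).toNat
  decreasing_by
    have h3 : 3 * i ≤ i * i := by nlinarith
    omega

def oddcomp_alt (n : Int) : Bool :=
  if PySem.Int.mod n 2 == 0 || n < 9 then false
  else oddcompLoop n 3 (by omega)

-- ===== PRECONDITION & SPEC =====
def Spec_oddcomp (n : Int) (out : Bool) : Prop := out = oddcomp_alt n
instance (n : Int) (out : Bool) : Decidable (Spec_oddcomp n out) := by unfold Spec_oddcomp; infer_instance

-- ===== CLAIM (what is proved, stated in full; the proofs are below) =====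
def Claim_equal_oddcomp : Prop := ∀ (n : Int), Dom_oddcomp n → Spec_oddcomp n (oddcomp n)

-- ===== LEMMAS AND PROOFS =====

-- ===== VERDICT (by name: the statement is the Claim_ definition above) =====
-- A = true iff n is odd and has a divisor in [2, n)
lemma foldl_flag (P : Int → Bool) (l : List Int) (k : Int) :
    l.foldl (fun k i => if P i then 1 else k) k = if l.any P then 1 else k := by
  induction l generalizing k with
  | nil => simp
  | cons x xs ih =>
    simp only [List.foldl, List.any_cons]
    by_cases hx : P x <;> simp [hx, ih]

lemma mod_two_cases (n : Int) : PySem.Int.mod n 2 = n % 2 :=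
  PySem.Int.mod_eq_emod_of_pos (by omega)

lemma oddcomp_true_iff (n : Int) :
    oddcomp n = true ↔ (n % 2 = 1 ∧ ∃ i : Int, 2 ≤ i ∧ i < n ∧ i ∣ n) := by
  unfold oddcomp
  rw [foldl_flag]
  by_cases hany : ((PySem.List.pyRange 2 n 1).any
      fun i => PySem.Int.mod n i == 0 && PySem.Int.mod n 2 == 1) = true
  · simp only [hany, if_true]
    simp only [List.any_eq_true, PySem.List.mem_pyRange_one, Bool.and_eq_true,
      beq_iff_eq, mod_two_cases, PySem.Int.mod_eq_zero_iff_dvd] at hany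
    obtain ⟨i, ⟨h1, h2⟩, h3, h4⟩ := hany
    simp only [show ((1 : Int) == 0) = false by decide, Bool.false_eq_true, if_false,
      true_iff]
    exact ⟨h4, i, h1, h2, h3⟩
  · rw [if_neg hany]
    simp only [List.any_eq_true, PySem.List.mem_pyRange_one, Bool.and_eq_true,
      beq_iff_eq, mod_two_cases, PySem.Int.mod_eq_zero_iff_dvd, not_exists] at hany
    simp only [beq_self_eq_true, if_true, Bool.false_eq_true, false_iff]
    rintro ⟨hodd, i, h1, h2, h3⟩
    exact hany i ⟨⟨h1, h2⟩, h3, hodd⟩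

lemma oddcompLoop_true_iff (n : Int) (i : Int) (hi : 3 ≤ i) (hodd : i % 2 = 1) :
    oddcompLoop n i hi = true ↔
      ∃ j : Int, i ≤ j ∧ j % 2 = 1 ∧ j * j ≤ n ∧ j ∣ n := by
  unfold oddcompLoop
  split
  · next h =>
    split
    · next hd =>
      simp only [beq_iff_eq] at hd
      have := (PySem.Int.mod_eq_zero_iff_dvd n i).mp hd
      simp only [true_iff]
      exact ⟨i, le_refl i, hodd, h, this⟩
    · next hd =>
      simp only [beq_iff_eq] at hd
      rw [oddcompLoop_true_iff n (i + 2) (by omega) (by omega)]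
      constructor
      · rintro ⟨j, h1, h2, h3, h4⟩
        exact ⟨j, by omega, h2, h3, h4⟩
      · rintro ⟨j, h1, h2, h3, h4⟩
        refine ⟨j, ?_, h2, h3, h4⟩
        rcases eq_or_lt_of_le h1 with heq | hlt
        · exact absurd ((PySem.Int.mod_eq_zero_iff_dvd n j).mpr h4)
            (by rw [← heq]; exact hd)
        · omega
  · next h =>
    simp only [Bool.false_eq_true, false_iff]
    rintro ⟨j, h1, _, h3, _⟩
    have : i * i ≤ j * j := by nlinarith
    omega
  termination_by (n - i).toNat
  decreasing_by
    have h3 : 3 * i ≤ i * i := by nlinarith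
    omega

lemma oddcomp_alt_true_iff (n : Int) :
    oddcomp_alt n = true ↔
      (n % 2 = 1 ∧ 9 ≤ n ∧ ∃ j : Int, 3 ≤ j ∧ j % 2 = 1 ∧ j * j ≤ n ∧ j ∣ n) := by
  unfold oddcomp_alt
  by_cases he : n % 2 = 1
  · by_cases hlt : n < 9
    · simp [he, hlt]
    · rw [if_neg (by simp [he, hlt])]
      rw [oddcompLoop_true_iff n 3 (by omega) (by norm_num)]
      constructor
      · rintro ⟨j, h1, h2, h3, h4⟩
        exact ⟨he, by omega, j, h1, h2, h3, h4⟩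
      · rintro ⟨_, _, j, h1, h2, h3, h4⟩
        exact ⟨j, h1, h2, h3, h4⟩
  · have h0 : n % 2 = 0 := by omega
    simp [h0]

-- the number-theoretic core: for odd n ≥ 9, a proper divisor exists iff an odd
-- divisor j with j*j ≤ n exists
lemma divisor_iff_small_odd_divisor (n : Int) (hn : 9 ≤ n) (hodd : n % 2 = 1) :
    (∃ i : Int, 2 ≤ i ∧ i < n ∧ i ∣ n) ↔
      (∃ j : Int, 3 ≤ j ∧ j % 2 = 1 ∧ j * j ≤ n ∧ j ∣ n) := by
  constructor
  · rintro ⟨i, h1, h2, h3⟩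
    set m : Nat := n.toNat with hm
    have hmn : (m : Int) = n := Int.toNat_of_nonneg (by omega)
    have hidvd : i.toNat ∣ m := by
      have : (i.toNat : Int) ∣ (m : Int) := by
        rw [hmn, Int.toNat_of_nonneg (by omega : (0:Int) ≤ i)]; exact h3
      exact_mod_cast this
    have hi2 : 2 ≤ i.toNat := by omega
    have him : i.toNat < m := by omega
    have hnp : ¬ m.Prime := by
      intro hp
      rcases (Nat.Prime.eq_one_or_self_of_dvd hp _ hidvd) with h | h <;> omega
    have hmpos : 0 < m := by omega
    set p : Nat := m.minFac with hp
    have hpdvd : p ∣ m := Nat.minFac_dvd m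
    have hpprime : p.Prime := Nat.minFac_prime (by omega)
    have hpsq : p * p ≤ m := by
      have := Nat.minFac_sq_le_self hmpos hnp
      simpa [hp, Nat.pow_two] using this
    have hmodd : ¬ 2 ∣ m := by
      rintro ⟨c, hc⟩
      have : (m : Int) = 2 * (c : Int) := by exact_mod_cast hc
      omega
    have hp2 : p ≠ 2 := fun h => hmodd (h ▸ hpdvd)
    have hp3 : 3 ≤ p := by
      have h2le := hpprime.two_le
      omega
    have hpodd : p % 2 = 1 := by
      rcases Nat.mod_two_eq_zero_or_one p with h | h
      · exact absurd (Nat.dvd_trans (Nat.dvd_of_mod_eq_zero h) hpdvd) hmodd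
      · exact h
    refine ⟨(p : Int), by exact_mod_cast hp3, ?_, ?_, ?_⟩
    · omega
    · calc ((p : Int)) * p = ((p * p : Nat) : Int) := by push_cast; ring
        _ ≤ (m : Int) := by exact_mod_cast hpsq
        _ = n := hmn
    · rw [← hmn]; exact_mod_cast hpdvd
  · rintro ⟨j, h1, h2, h3, h4⟩
    exact ⟨j, by omega, by nlinarith, h4⟩

theorem oddcomp_spec : Claim_equal_oddcomp := by
  intro n _
  unfold Spec_oddcomp
  rw [Bool.eq_iff_iff, oddcomp_true_iff, oddcomp_alt_true_iff]
  constructor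
  · rintro ⟨hodd, hex⟩
    have hn9 : 9 ≤ n := by
      by_contra hlt
      obtain ⟨i, h1, h2, h3⟩ := hex
      have hn0 : 0 < n := by omega
      obtain ⟨c, hc⟩ := h3
      interval_cases n <;> interval_cases i <;> omega
    exact ⟨hodd, hn9, (divisor_iff_small_odd_divisor n hn9 hodd).mp hex⟩
  · rintro ⟨hodd, hn9, hex⟩
    exact ⟨hodd, (divisor_iff_small_odd_divisor n hn9 hodd).mpr hex⟩
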